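-- pv_equiv track=rewrite | github.com/pypi-data/pypi-mirror-392 | packages/siada-cli/siada_cli-1.5.6-py3-none-any.whl/siada/services/file_recommendation/utils/path_utils.py | escape_path
-- ===== SOURCE A (Python) =====
-- def escape_path(file_path: str) -> str:
--     """
--     Escape spaces in file paths
--
--     Args:
--         file_path: Original file path
--
--     Returns:
--         str: Escaped path
--     """
--     result = ""
--     for i, char in enumerate(file_path):
--         # Only escape unescaped spaces
--         if char == ' ' and (i == 0 or file_path[i-1] != '\\'):
--             result += '\\ '
--         else:
--             result += char
--     return result
-- ===== SOURCE B (Python) =====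
-- def escape_path(file_path: str) -> str:
--     """
--     Escape spaces in file paths
--
--     Args:
--         file_path: Original file path
--
--     Returns:
--         str: Escaped path
--     """
--     parts = file_path.split('\\ ')
--     return '\\ '.join(part.replace(' ', '\\ ') for part in parts)
-- ===== Notes on version B (the rewrite author's own statement) =====
-- stated objective: idiomatic
-- what changed: The indexed loop with a look-behind test and character-by-character string accumulation is replaced by splitting on the already-escaped backslash-space sequence, escaping every space inside each part, and joining the parts back with the same sequence.
import Mathlib
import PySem

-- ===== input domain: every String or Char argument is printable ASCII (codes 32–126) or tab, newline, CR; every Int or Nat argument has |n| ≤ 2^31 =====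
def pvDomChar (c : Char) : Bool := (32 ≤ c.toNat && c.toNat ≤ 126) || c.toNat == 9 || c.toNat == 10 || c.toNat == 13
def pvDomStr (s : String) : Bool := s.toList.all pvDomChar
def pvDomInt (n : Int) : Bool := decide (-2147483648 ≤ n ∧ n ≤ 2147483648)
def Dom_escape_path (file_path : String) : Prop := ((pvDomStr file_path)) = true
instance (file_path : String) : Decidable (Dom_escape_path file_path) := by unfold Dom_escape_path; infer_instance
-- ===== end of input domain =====

-- B replaces A's indexed look-behind loop and per-character accumulation by split-on-escaped-space / escape-each-part / join (idiomatic; a timing run measured B faster).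

-- ===== PORT A =====
def escape_path (file_path : String) : String :=
  (PySem.List.enumerate file_path.toList 0).foldl
    (fun result ic =>
      if ic.2 = ' ' ∧ (ic.1 = 0 ∨ PySem.Str.pyGet? file_path (ic.1 - 1) ≠ some '\\')
      then result ++ "\\ "
      else result ++ ic.2.toString)
    ""

-- ===== PORT B =====
-- file_path.split('\ ') (sep nonempty, so split? is always `some`; getD [] only makes it total),
-- each part escapes its spaces, '\ '.join(...) reassembles.
def escape_path_alt (file_path : String) : String :=
  PySem.Str.join "\\ "
    (((PySem.Str.split? file_path "\\ ").getD []).map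
      (fun part => PySem.Str.replace part " " "\\ "))

-- ===== PRECONDITION & SPEC =====
def Spec_escape_path (file_path : String) (out : String) : Prop := out = escape_path_alt file_path
instance (file_path : String) (out : String) : Decidable (Spec_escape_path file_path out) := by unfold Spec_escape_path; infer_instance

-- ===== CLAIM (what is proved, stated in full; the proofs are below) =====
def Claim_equal_escape_path : Prop := ∀ (file_path : String), Dom_escape_path file_path → Spec_escape_path file_path (escape_path file_path)

-- ===== LEMMAS AND PROOFS =====

-- the reference result: escape every space not immediately preceded by a backslash
def esc : List Char → List Char
  | [] => []
  | '\\' :: ' ' :: r => '\\' :: ' ' :: esc r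
  | c :: r => (if c = ' ' then ['\\', ' '] else [c]) ++ esc r

-- A's loop, expressed with the previous character instead of an index
def escFrom : Option Char → List Char → List Char
  | _, [] => []
  | prev, c :: r => (if c = ' ' ∧ prev ≠ some '\\' then ['\\', ' '] else [c]) ++ escFrom (some c) r

-- what splitting on '\ ' computes, structurally
def splitBS : List Char → List (List Char)
  | [] => [[]]
  | '\\' :: ' ' :: r => [] :: splitBS r
  | c :: r => (splitBS r).modifyHead (c :: ·)

-- what replacing ' ' by '\ ' computes, structurally
def replSp : List Char → List Char
  | [] => []
  | ' ' :: r => '\\' :: ' ' :: replSp r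
  | c :: r => c :: replSp r

theorem splitBS_ne_nil (l : List Char) : splitBS l ≠ [] := by
  fun_induction splitBS l <;> simp_all

theorem replSp_cons (c : Char) (t : List Char) :
    replSp (c :: t) = (if c = ' ' then ['\\', ' '] else [c]) ++ replSp t := by
  by_cases hc : c = ' ' <;> simp [replSp, hc]

theorem splitOn_go_eq (fuel : Nat) (l cur : List Char) (acc : List (List Char)) (h : l.length ≤ fuel) :
    PySem.Chars.splitOn.go ['\\', ' '] fuel l cur acc
      = acc.reverse ++ (splitBS l).modifyHead (cur.reverse ++ ·) := by
  induction fuel generalizing l cur acc with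
  | zero =>
    have : l = [] := by simpa using h
    subst this
    simp [PySem.Chars.splitOn.go, splitBS]
  | succ f ih =>
    match l with
    | [] => simp [PySem.Chars.splitOn.go, splitBS]
    | c :: t =>
      rw [PySem.Chars.splitOn.go]
      by_cases hp : ['\\', ' '].isPrefixOf (c :: t) = true
      · obtain ⟨hc, r, ht⟩ : c = '\\' ∧ ∃ r, t = ' ' :: r := by
          cases t with
          | nil => simp [List.isPrefixOf] at hp
          | cons c2 r =>
            simp [List.isPrefixOf] at hp
            exact ⟨hp.1.symm, r, by rw [← hp.2]⟩
        subst hc; subst ht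
        rw [if_pos hp, ih _ _ _ (by simp at h ⊢; omega)]
        simp only [splitBS, List.reverse_cons, List.modifyHead_cons, List.append_assoc,
          List.cons_append, List.nil_append, List.append_nil]
        cases hx : splitBS r <;> simp [hx]
      · rw [if_neg hp, ih _ _ _ (by simpa using Nat.le_of_succ_le_succ h)]
        have hsc : splitBS (c :: t) = (splitBS t).modifyHead (c :: ·) := by
          cases t with
          | nil => simp [splitBS]
          | cons c2 r =>
            by_cases hc : c = '\\'
            · subst hc
              have h2 : ¬ c2 = ' ' := by intro h'; subst h'; simp [List.isPrefixOf] at hp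
              simp [splitBS, h2]
            · simp [splitBS, hc]
        rw [hsc]
        obtain ⟨hd, tl, hs⟩ : ∃ hd tl, splitBS t = hd :: tl := by
          cases hx : splitBS t with
          | nil => exact absurd hx (splitBS_ne_nil t)
          | cons a b => exact ⟨a, b, rfl⟩
        simp [hs]

theorem replace_go_eq (fuel : Nat) (l acc : List Char) (h : l.length ≤ fuel) :
    PySem.Chars.replace.go [' '] ['\\', ' '] fuel l acc = acc.reverse ++ replSp l := by
  induction fuel generalizing l acc with
  | zero =>
    have : l = [] := by simpa using h
    subst this
    simp [PySem.Chars.replace.go, replSp]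
  | succ f ih =>
    match l with
    | [] => simp [PySem.Chars.replace.go, replSp]
    | c :: t =>
      rw [PySem.Chars.replace.go]
      by_cases hc : c = ' '
      · subst hc
        rw [if_pos (by simp)]
        rw [ih _ _ (by simpa using Nat.le_of_succ_le_succ h)]
        simp [replSp]
      · rw [if_neg (by simp [List.isPrefixOf]; exact fun h' => hc h'.symm)]
        rw [ih _ _ (by simpa using Nat.le_of_succ_le_succ h)]
        simp [replSp]

theorem intercalate_cc (sep x y : List Char) (ys : List (List Char)) :
    List.intercalate sep (x :: y :: ys) = x ++ sep ++ List.intercalate sep (y :: ys) := by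
  simp [List.intercalate]

theorem joinMap_eq_esc (l : List Char) :
    List.intercalate ['\\', ' '] ((splitBS l).map replSp) = esc l := by
  fun_induction splitBS l with
  | case1 => simp [replSp, esc, List.intercalate]
  | case2 r ih =>
    obtain ⟨hd, tl, hs⟩ : ∃ hd tl, splitBS r = hd :: tl := by
      cases hx : splitBS r with
      | nil => exact absurd hx (splitBS_ne_nil r)
      | cons a b => exact ⟨a, b, rfl⟩
    rw [hs] at ih ⊢
    rw [List.map_cons] at ih
    rw [List.map_cons, List.map_cons, intercalate_cc]
    simp only [esc]
    rw [ih]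
    simp [replSp]
  | case3 c r h1 ih =>
    obtain ⟨hd, tl, hs⟩ : ∃ hd tl, splitBS r = hd :: tl := by
      cases hx : splitBS r with
      | nil => exact absurd hx (splitBS_ne_nil r)
      | cons a b => exact ⟨a, b, rfl⟩
    rw [hs] at ih ⊢
    have hesc : esc (c :: r) = (if c = ' ' then ['\\', ' '] else [c]) ++ esc r := by
      cases r with
      | nil => by_cases hc : c = ' ' <;> simp [esc, hc]
      | cons c2 r2 =>
        by_cases hb : c = '\\'
        · have h2 : ¬ c2 = ' ' := fun h => h1 r2 hb (by rw [h])
          simp [esc, h2]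
        · simp [esc, hb]
    rw [List.map_cons] at ih
    rw [hesc, ← ih]
    cases tl with
    | nil => simp [List.intercalate, replSp_cons]
    | cons y ys =>
      rw [List.modifyHead_cons, List.map_cons, List.map_cons,
        intercalate_cc, intercalate_cc, replSp_cons]
      simp

theorem escFrom_some (cs : List Char) (p : Char) :
    escFrom (some p) cs
      = if p = '\\' ∧ cs.head? = some ' ' then ' ' :: esc cs.tail else esc cs := by
  induction cs generalizing p with
  | nil => simp [escFrom, esc]
  | cons c r ih =>
    rw [escFrom, ih c]
    by_cases hc : c = ' '
    · subst hc
      by_cases hp : p = '\\' <;> simp [hp, esc]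
    · match r, c, hc with
      | ' ' :: r2, '\\', _ => simp [esc]
      | ' ' :: r2, c, hc =>
        by_cases hb : c = '\\'
        · subst hb; simp [esc]
        · simp [hc, hb, esc]
      | [], c, hc => simp [hc, esc]
      | c2 :: r2, c, hc =>
        by_cases h2 : c2 = ' '
        · subst h2
          by_cases hb : c = '\\'
          · subst hb; simp [esc]
          · simp [hc, hb, esc]
        · simp [hc, h2, esc]

theorem escFrom_none (cs : List Char) : escFrom none cs = esc cs := by
  cases cs with
  | nil => rfl
  | cons c r =>
    rw [escFrom, escFrom_some]
    by_cases hc : c = ' '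
    · simp [hc, esc]
    · match r, c, hc with
      | ' ' :: r2, '\\', _ => simp [esc]
      | ' ' :: r2, c, hc =>
        by_cases hb : c = '\\'
        · subst hb; simp [esc]
        · simp [hc, hb, esc]
      | [], c, hc => simp [hc, esc]
      | c2 :: r2, c, hc =>
        by_cases h2 : c2 = ' '
        · subst h2
          by_cases hb : c = '\\'
          · subst hb; simp [esc]
          · simp [hc, hb, esc]
        · simp [hc, h2, esc]

theorem cond_eq (pre rest : List Char) (c : Char) :
    (((pre.length : Int) = 0 ∨ PySem.List.pyGet? (pre ++ c :: rest) ((pre.length : Int) - 1) ≠ some '\\'))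
      ↔ pre.getLast? ≠ some '\\' := by
  rcases List.eq_nil_or_concat pre with rfl | ⟨q, p, hqp⟩
  all_goals try subst hqp
  all_goals try rw [List.concat_eq_append] at *
  · simp
  · have h2 : ((q ++ [p]).length : Int) - 1 = (q.length : Int) := by simp
    have h3 : PySem.List.pyGet? (q ++ [p] ++ c :: rest) (q.length : Int) = some p := by
      rw [List.append_assoc]
      exact PySem.List.pyGet?_append_length q _ p
    rw [h2, h3]
    simp
    exact fun hx => absurd hx (by omega)

theorem foldA (s : String) (suffix pre : List Char) (acc : String)
    (h : s.toList = pre ++ suffix) :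
    ((PySem.List.enumerate suffix (pre.length : Int)).foldl
      (fun result ic =>
        if ic.2 = ' ' ∧ (ic.1 = 0 ∨ PySem.Str.pyGet? s (ic.1 - 1) ≠ some '\\')
        then result ++ "\\ "
        else result ++ ic.2.toString) acc).toList
      = acc.toList ++ escFrom pre.getLast? suffix := by
  induction suffix generalizing pre acc with
  | nil => simp [PySem.List.enumerate, escFrom]
  | cons c rest ih =>
    rw [PySem.List.enumerate_cons, List.foldl_cons]
    have hlen : ((pre.length : Int) + 1) = (((pre ++ [c]).length : Int)) := by simp
    have hstep : s.toList = (pre ++ [c]) ++ rest := by rw [h]; simp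
    rw [hlen, ih (pre ++ [c]) _ hstep]
    have hc : (PySem.Str.pyGet? s ((pre.length : Int) - 1) = PySem.List.pyGet? (pre ++ c :: rest) ((pre.length : Int) - 1)) := by
      simp [h]
    simp only [hc]
    by_cases hcond : c = ' ' ∧ ((pre.length : Int) = 0 ∨ PySem.List.pyGet? (pre ++ c :: rest) ((pre.length : Int) - 1) ≠ some '\\')
    · rw [if_pos hcond]
      rw [escFrom, if_pos ⟨hcond.1, (cond_eq pre rest c).mp hcond.2⟩]
      simp
    · rw [if_neg hcond]
      rw [escFrom]
      rw [if_neg (by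
        intro ⟨h1', h2'⟩
        exact hcond ⟨h1', (cond_eq pre rest c).mpr h2'⟩)]
      simp

theorem altEq (s : String) :
    escape_path_alt s
      = String.ofList (List.intercalate ['\\', ' '] ((splitBS s.toList).map replSp)) := by
  have hsep : ("\\ ").toList = ['\\', ' '] := by rfl
  have hsp : (" ").toList = [' '] := by rfl
  have hsplit : PySem.Chars.splitOn s.toList ['\\', ' '] = splitBS s.toList := by
    rw [PySem.Chars.splitOn, splitOn_go_eq _ _ _ _ (by omega)]
    cases splitBS s.toList <;> simp
  unfold escape_path_alt
  rw [PySem.Str.split?, PySem.Chars.split?, hsep]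
  simp only [List.isEmpty_cons, if_neg (by decide : ¬(false = true)), Option.getD_some, Option.map_some]
  rw [hsplit, PySem.Str.join]
  congr 1
  rw [hsep]
  rw [PySem.Chars.join]
  congr 1
  rw [List.map_map, List.map_map]
  apply List.map_congr_left
  intro part hp
  simp only [Function.comp]
  rw [PySem.Str.replace, hsp, hsep]
  rw [PySem.Chars.replace]
  rw [if_neg (by decide)]
  simp only [String.toList_ofList]
  rw [replace_go_eq _ _ _ (by omega)]
  simp

-- ===== VERDICT (by name: the statement is the Claim_ definition above) =====
theorem escape_path_spec : Claim_equal_escape_path := by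
  intro s _
  unfold Spec_escape_path
  have hA : (escape_path s).toList = escFrom none s.toList := by
    have := foldA s s.toList [] "" (by simp)
    simpa [escape_path] using this
  have : (escape_path s).toList = (escape_path_alt s).toList := by
    rw [hA, escFrom_none, altEq, ← joinMap_eq_esc]
    simp
  calc escape_path s = String.ofList (escape_path s).toList := by simp
    _ = String.ofList (escape_path_alt s).toList := by rw [this]
    _ = escape_path_alt s := by simp
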